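-- pv_equiv track=rewrite | github.com/fcanata061/sources | source/modules/build.py | _levels_from_order
-- ===== SOURCE A (Python) =====
-- from typing import Dict, List, Optional, Set, Any
--
-- def _levels_from_order(order: List[str], deps: Dict[str, List[str]]) -> List[List[str]]:
--     remain = set(order)
--     levels = []
--     built = set()
--     while remain:
--         this = []
--         for n in list(remain):
--             if set(deps.get(n, [])).issubset(built):
--                 this.append(n)
--         if not this:
--             raise RuntimeError("Cannot form build levels (cycle?)")
--         for n in this:
--             remain.remove(n)
--             built.add(n)
--         levels.append(sorted(this))
--     return levels
-- ===== SOURCE B (Python) =====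
-- from typing import Dict, List
--
-- def _levels_from_order(order: List[str], deps: Dict[str, List[str]]) -> List[List[str]]:
--     # Kahn-style level BFS: unmet-dependency sets plus a reverse-adjacency index,
--     # so each dependency edge is touched once instead of rescanning every
--     # remaining node on every level.
--     nodes = set(order)
--     unmet = {}
--     radj = {}
--     for n in nodes:
--         ds = set(deps.get(n, []))
--         unmet[n] = ds
--         for d in ds:
--             radj.setdefault(d, []).append(n)
--     frontier = [n for n in nodes if not unmet[n]]
--     levels = []
--     done = 0
--     while frontier:
--         levels.append(sorted(frontier))
--         done += len(frontier)
--         nxt = []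
--         for f in frontier:
--             for m in radj.get(f, []):
--                 u = unmet[m]
--                 if f in u:
--                     u.discard(f)
--                     if not u:
--                         nxt.append(m)
--         frontier = nxt
--     if done != len(nodes):
--         raise RuntimeError("Cannot form build levels (cycle?)")
--     return levels
-- ===== Notes on version B (the rewrite author's own statement) =====
-- stated objective: faster
-- what changed: A rescans every remaining node on every level and re-runs a set-subset test per node; B precomputes per-node unmet-dependency sets plus a reverse-adjacency index and runs a Kahn-style level BFS, touching each dependency edge once.
import Mathlib
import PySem

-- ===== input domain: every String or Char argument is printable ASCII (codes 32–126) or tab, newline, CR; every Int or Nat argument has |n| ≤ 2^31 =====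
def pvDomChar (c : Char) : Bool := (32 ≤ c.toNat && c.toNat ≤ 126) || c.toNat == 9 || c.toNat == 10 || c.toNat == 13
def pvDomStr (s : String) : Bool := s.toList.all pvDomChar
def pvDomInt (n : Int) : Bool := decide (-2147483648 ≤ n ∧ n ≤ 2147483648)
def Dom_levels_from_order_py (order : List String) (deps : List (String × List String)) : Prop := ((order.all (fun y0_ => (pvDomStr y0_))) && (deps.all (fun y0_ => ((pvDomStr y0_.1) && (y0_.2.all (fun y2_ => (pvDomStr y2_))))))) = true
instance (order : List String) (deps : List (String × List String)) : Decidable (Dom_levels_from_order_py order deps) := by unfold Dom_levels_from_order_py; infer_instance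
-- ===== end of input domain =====

-- B replaces A's per-level rescan of every remaining node (subset test each time) by a Kahn-style
-- level BFS over a precomputed reverse-adjacency index with unmet-dependency sets.

-- ===== PORT A =====
-- deps.get(n, [])  (dict lookup with default)
def pvGetDeps (deps : List (String × List String)) (n : String) : List String :=
  PySem.Dict.getD (PySem.Dict.mk deps) n []

-- the body of `for n in list(remain): if set(deps.get(n, [])).issubset(built): this.append(n)`
-- (the Python set's iteration order is immaterial to the result: each level is sorted before use)
def pvAThis (deps : List (String × List String)) (remain built : PySem.Set String) : List String :=
  remain.foldl (fun this n =>
    if PySem.Set.issubset (PySem.Set.ofList (pvGetDeps deps n)) built then this ++ [n] else this) []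

-- `while remain:` — fuel = |remain| bounds the rounds (each round removes ≥ 1 node; totality guard
-- only).  `this = []` is Python's `raise RuntimeError("Cannot form build levels (cycle?)")`: the
-- port stops there (such inputs are excluded by Pre_).  `remain.remove(n)` is `discard` here:
-- n ∈ this ⊆ remain, so Python's KeyError can not fire.
def pvALoop (deps : List (String × List String)) :
    Nat → PySem.Set String → PySem.Set String → List (List String) → List (List String)
  | 0, _, _, levels => levels
  | fuel + 1, remain, built, levels =>
    if remain = [] then levels
    else
      let this := pvAThis deps remain built
      if this = [] then levels
      else
        pvALoop deps fuel
          (this.foldl (fun r n => PySem.Set.discard r n) remain)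
          (this.foldl (fun b n => PySem.Set.add b n) built)
          (levels ++ [PySem.List.sorted this (fun x => x)])

def levels_from_order_py (order : List String) (deps : List (String × List String)) : List (List String) :=
  let remain := PySem.Set.ofList order
  pvALoop deps remain.length remain PySem.Set.empty []

-- ===== PORT B =====
-- `for n in nodes: ds = set(deps.get(n, [])); unmet[n] = ds; for d in ds: radj.setdefault(d, []).append(n)`
def pvBInit (deps : List (String × List String)) (nodes : PySem.Set String) :
    PySem.Dict String (PySem.Set String) × PySem.Dict String (List String) :=
  nodes.foldl (fun st n =>
    let ds := PySem.Set.ofList (pvGetDeps deps n)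
    (st.1.insert n ds,
     ds.foldl (fun r d => r.insert d (PySem.Dict.getD r d [] ++ [n])) st.2))
    (PySem.Dict.mk [], PySem.Dict.mk [])

-- one round: `for f in frontier: for m in radj.get(f, []): u = unmet[m]; if f in u: u.discard(f);
-- if not u: nxt.append(m)`  (unmet[m] never misses: every m in radj lists is a key; getD guards it)
def pvBRound (radj : PySem.Dict String (List String)) (frontier : List String)
    (unmet : PySem.Dict String (PySem.Set String)) :
    PySem.Dict String (PySem.Set String) × List String :=
  frontier.foldl (fun st f =>
    (PySem.Dict.getD radj f []).foldl (fun st2 m =>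
      let u := PySem.Dict.getD st2.1 m PySem.Set.empty
      if PySem.Set.contains u f then
        let u' := PySem.Set.discard u f
        (st2.1.insert m u', if u' = [] then st2.2 ++ [m] else st2.2)
      else st2) st) (unmet, [])

-- `while frontier:` — fuel = |nodes| bounds the rounds (levels are disjoint and nonempty;
-- totality guard only); returns (levels, done)
def pvBLoop (radj : PySem.Dict String (List String)) :
    Nat → List String → PySem.Dict String (PySem.Set String) → List (List String) → Int →
    List (List String) × Int
  | 0, _, _, levels, done => (levels, done)
  | fuel + 1, frontier, unmet, levels, done =>
    if frontier = [] then (levels, done)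
    else
      let st := pvBRound radj frontier unmet
      pvBLoop radj fuel st.2 st.1 (levels ++ [PySem.List.sorted frontier (fun x => x)])
        (done + (frontier.length : Int))

-- `if done != len(nodes): raise RuntimeError(...)` is Python's cycle error — excluded by Pre_;
-- the port returns the levels built so far.
def levels_from_order_py_alt (order : List String) (deps : List (String × List String)) : List (List String) :=
  let nodes := PySem.Set.ofList order
  let st := pvBInit deps nodes
  let frontier := nodes.filter (fun n => (PySem.Dict.getD st.1 n PySem.Set.empty).isEmpty)
  (pvBLoop st.2 nodes.length frontier st.1 [] 0).1

-- ===== PRECONDITION & SPEC =====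
-- Pre_ excludes exactly the inputs on which A (and B) raises RuntimeError — a dependency cycle, or
-- a dependency that never occurs in `order`: the standard well-foundedness condition "every
-- nonempty subset of the distinct build targets contains a node all of whose dependencies lie in
-- `order` and outside that subset".
def Pre_levels_from_order_py (order : List String) (deps : List (String × List String)) : Prop :=
  ∀ S ∈ (PySem.List.dedup order).sublists, S ≠ [] →
    ∃ n ∈ S, ∀ d ∈ pvGetDeps deps n, d ∈ order ∧ d ∉ S
instance (order : List String) (deps : List (String × List String)) : Decidable (Pre_levels_from_order_py order deps) := by unfold Pre_levels_from_order_py; infer_instance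

def pvWitness_levels_from_order_py : List String × (List (String × List String)) :=
  (["a", "b"], [("b", ["a"])])

def Spec_levels_from_order_py (order : List String) (deps : List (String × List String)) (out : List (List String)) : Prop := out = levels_from_order_py_alt order deps
instance (order : List String) (deps : List (String × List String)) (out : List (List String)) : Decidable (Spec_levels_from_order_py order deps out) := by unfold Spec_levels_from_order_py; infer_instance

-- ===== CLAIM (what is proved, stated in full; the proofs are below) =====
def Claim_equal_levels_from_order_py : Prop := ∀ (order : List String) (deps : List (String × List String)), Dom_levels_from_order_py order deps → Pre_levels_from_order_py order deps → Spec_levels_from_order_py order deps (levels_from_order_py order deps)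

-- ===== LEMMAS AND PROOFS =====

lemma pv_mem_foldl_discard (l : List String) (s : PySem.Set String) (x : String) :
    x ∈ l.foldl (fun r n => PySem.Set.discard r n) s ↔ x ∈ s ∧ x ∉ l := by
  induction l generalizing s with
  | nil => simp
  | cons a t ih =>
    simp only [List.foldl_cons, ih, PySem.Set.mem_discard, List.mem_cons]
    tauto

lemma pv_nodup_foldl_discard (l : List String) (s : PySem.Set String) (h : s.Nodup) :
    (l.foldl (fun r n => PySem.Set.discard r n) s).Nodup := by
  induction l generalizing s with
  | nil => exact h
  | cons a t ih => exact ih _ (PySem.Set.nodup_discard _ _ h)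

lemma pv_mem_foldl_add (l : List String) (s : PySem.Set String) (x : String) :
    x ∈ l.foldl (fun b n => PySem.Set.add b n) s ↔ x ∈ s ∨ x ∈ l := by
  induction l generalizing s with
  | nil => simp
  | cons a t ih =>
    simp only [List.foldl_cons, ih, PySem.Set.mem_add, List.mem_cons]
    tauto

lemma pvAThis_eq_filter (deps : List (String × List String)) (remain built : PySem.Set String) :
    pvAThis deps remain built
      = remain.filter (fun n => PySem.Set.issubset (PySem.Set.ofList (pvGetDeps deps n)) built) := by
  unfold pvAThis
  simpa using PySem.List.foldl_append_if
    (fun n => PySem.Set.issubset (PySem.Set.ofList (pvGetDeps deps n)) built) (fun n => n) remain []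
lemma pv_stepfun_eq (f : String) :
    (fun (st2 : PySem.Dict String (PySem.Set String) × List String) m =>
          let u := PySem.Dict.getD st2.1 m PySem.Set.empty
          if PySem.Set.contains u f then
            let u' := PySem.Set.discard u f
            (st2.1.insert m u', if u' = [] then st2.2 ++ [m] else st2.2)
          else st2)
      = (fun (st2 : PySem.Dict String (PySem.Set String) × List String) m =>
          if f ∈ PySem.Dict.getD st2.1 m PySem.Set.empty then
            (st2.1.insert m (PySem.Set.discard (PySem.Dict.getD st2.1 m PySem.Set.empty) f),
             if PySem.Set.discard (PySem.Dict.getD st2.1 m PySem.Set.empty) f = [] then st2.2 ++ [m] else st2.2)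
          else st2) := by
  funext st2 m
  simp

lemma pv_round_inner_canon (f : String) (ms : List String) :
    ∀ (U : PySem.Dict String (PySem.Set String)) (acc : List String),
      (∀ x ∈ acc, U.getD x PySem.Set.empty = []) → acc.Nodup →
      ((∀ m d, d ∈ (ms.foldl (fun (st2 : PySem.Dict String (PySem.Set String) × List String) m =>
          if f ∈ PySem.Dict.getD st2.1 m PySem.Set.empty then
            (st2.1.insert m (PySem.Set.discard (PySem.Dict.getD st2.1 m PySem.Set.empty) f),
             if PySem.Set.discard (PySem.Dict.getD st2.1 m PySem.Set.empty) f = [] then st2.2 ++ [m] else st2.2)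
          else st2) (U, acc)).1.getD m PySem.Set.empty ↔
            (d ∈ U.getD m PySem.Set.empty ∧ (m ∈ ms → d ≠ f))) ∧
       (∀ x, x ∈ (ms.foldl (fun (st2 : PySem.Dict String (PySem.Set String) × List String) m =>
          if f ∈ PySem.Dict.getD st2.1 m PySem.Set.empty then
            (st2.1.insert m (PySem.Set.discard (PySem.Dict.getD st2.1 m PySem.Set.empty) f),
             if PySem.Set.discard (PySem.Dict.getD st2.1 m PySem.Set.empty) f = [] then st2.2 ++ [m] else st2.2)
          else st2) (U, acc)).2 ↔
            (x ∈ acc ∨ (x ∈ ms ∧ f ∈ U.getD x PySem.Set.empty ∧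
              ∀ d ∈ U.getD x PySem.Set.empty, d = f))) ∧
       (∀ x ∈ (ms.foldl (fun (st2 : PySem.Dict String (PySem.Set String) × List String) m =>
          if f ∈ PySem.Dict.getD st2.1 m PySem.Set.empty then
            (st2.1.insert m (PySem.Set.discard (PySem.Dict.getD st2.1 m PySem.Set.empty) f),
             if PySem.Set.discard (PySem.Dict.getD st2.1 m PySem.Set.empty) f = [] then st2.2 ++ [m] else st2.2)
          else st2) (U, acc)).2, (ms.foldl (fun (st2 : PySem.Dict String (PySem.Set String) × List String) m =>
          if f ∈ PySem.Dict.getD st2.1 m PySem.Set.empty then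
            (st2.1.insert m (PySem.Set.discard (PySem.Dict.getD st2.1 m PySem.Set.empty) f),
             if PySem.Set.discard (PySem.Dict.getD st2.1 m PySem.Set.empty) f = [] then st2.2 ++ [m] else st2.2)
          else st2) (U, acc)).1.getD x PySem.Set.empty = []) ∧
       (ms.foldl (fun (st2 : PySem.Dict String (PySem.Set String) × List String) m =>
          if f ∈ PySem.Dict.getD st2.1 m PySem.Set.empty then
            (st2.1.insert m (PySem.Set.discard (PySem.Dict.getD st2.1 m PySem.Set.empty) f),
             if PySem.Set.discard (PySem.Dict.getD st2.1 m PySem.Set.empty) f = [] then st2.2 ++ [m] else st2.2)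
          else st2) (U, acc)).2.Nodup) := by
  induction ms with
  | nil =>
    intro U acc hacc hnd
    refine ⟨by simp, by simp, hacc, hnd⟩
  | cons m0 t ih =>
    intro U acc hacc hnd
    simp only [List.foldl_cons]
    by_cases hg : f ∈ PySem.Dict.getD U m0 PySem.Set.empty
    · rw [if_pos hg]
      have hm0acc : m0 ∉ acc := by
        intro hin
        have := hacc m0 hin
        rw [this] at hg; simp at hg
      set u := PySem.Dict.getD U m0 PySem.Set.empty with hu
      set u' := PySem.Set.discard u f with hu'
      set U1 := U.insert m0 u' with hU1
      set acc1 := (if u' = [] then acc ++ [m0] else acc) with hacc1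
      have hgetD1 : ∀ m, PySem.Dict.getD U1 m PySem.Set.empty
          = if m = m0 then u' else PySem.Dict.getD U m PySem.Set.empty := by
        intro m; rw [hU1, PySem.Dict.getD_insert]
      have hacc1mem : ∀ x, x ∈ acc1 ↔ (x ∈ acc ∨ (u' = [] ∧ x = m0)) := by
        intro x; rw [hacc1]; split_ifs with he <;> simp [he]
      have hacc1inv : ∀ x ∈ acc1, PySem.Dict.getD U1 x PySem.Set.empty = [] := by
        intro x hx
        rcases (hacc1mem x).1 hx with h | ⟨he, rfl⟩
        · have hxm0 : x ≠ m0 := fun hxe => hm0acc (hxe ▸ h)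
          rw [hgetD1, if_neg hxm0]; exact hacc x h
        · rw [hgetD1, if_pos rfl]; exact he
      have hacc1nd : acc1.Nodup := by
        rw [hacc1]; split_ifs with he
        · exact List.Nodup.append hnd (List.nodup_singleton m0) (by simpa using hm0acc)
        · exact hnd
      have hiff : u' = [] ↔ ∀ d ∈ u, d = f := by
        rw [hu', List.eq_nil_iff_forall_not_mem]
        constructor
        · intro h d hd; by_contra hne; exact h d ((PySem.Set.mem_discard u f d).2 ⟨hd, hne⟩)
        · intro h d hd; rw [PySem.Set.mem_discard] at hd; exact hd.2 (h d hd.1)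
      obtain ⟨ih1, ih2, ih3, ih4⟩ := ih U1 acc1 hacc1inv hacc1nd
      refine ⟨?_, ?_, ih3, ih4⟩
      · intro m d
        rw [ih1, hgetD1]
        by_cases hm : m = m0
        · subst hm
          rw [if_pos rfl, hu', PySem.Set.mem_discard]
          simp only [List.mem_cons]
          constructor
          · rintro ⟨⟨h1, h2⟩, _⟩; exact ⟨h1, fun _ => h2⟩
          · rintro ⟨h1, h2⟩; exact ⟨⟨h1, h2 (by simp)⟩, fun _ => h2 (by simp)⟩
        · rw [if_neg hm]
          simp only [List.mem_cons]
          constructor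
          · rintro ⟨h1, h2⟩
            refine ⟨h1, fun h => h2 ?_⟩
            rcases h with h | h
            · exact absurd h hm
            · exact h
          · rintro ⟨h1, h2⟩; exact ⟨h1, fun h => h2 (Or.inr h)⟩
      · intro x
        rw [ih2, hacc1mem]
        by_cases hx : x = m0
        · subst hx
          have hfu' : f ∉ u' := by rw [hu', PySem.Set.mem_discard]; simp
          have hU1m0 : PySem.Dict.getD U1 x PySem.Set.empty = u' := by rw [hgetD1, if_pos rfl]
          constructor
          · rintro ((h | ⟨he, _⟩) | ⟨_, hf1, _⟩)
            · exact Or.inl h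
            · exact Or.inr ⟨List.mem_cons_self .., hg, hiff.1 he⟩
            · rw [hU1m0] at hf1; exact absurd hf1 hfu'
          · rintro (h | ⟨_, _, hall⟩)
            · exact Or.inl (Or.inl h)
            · exact Or.inl (Or.inr ⟨hiff.2 hall, rfl⟩)
        · have hU1x : PySem.Dict.getD U1 x PySem.Set.empty = PySem.Dict.getD U x PySem.Set.empty := by
            rw [hgetD1, if_neg hx]
          rw [hU1x]
          simp only [List.mem_cons]
          constructor
          · rintro ((h | ⟨_, hxx⟩) | ⟨ht, h2, h3⟩)
            · exact Or.inl h
            · exact absurd hxx hx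
            · exact Or.inr ⟨Or.inr ht, h2, h3⟩
          · rintro (h | ⟨(h | h), h2, h3⟩)
            · exact Or.inl (Or.inl h)
            · exact absurd h hx
            · exact Or.inr ⟨h, h2, h3⟩
    · rw [if_neg hg]
      obtain ⟨ih1, ih2, ih3, ih4⟩ := ih U acc hacc hnd
      refine ⟨?_, ?_, ih3, ih4⟩
      · intro m d
        rw [ih1]
        constructor
        · rintro ⟨h1, h2⟩
          refine ⟨h1, fun h => ?_⟩
          rcases List.mem_cons.1 h with h | h
          · subst h; rintro rfl; exact hg h1
          · exact h2 h
        · rintro ⟨h1, h2⟩; exact ⟨h1, fun h => h2 (List.mem_cons.2 (Or.inr h))⟩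
      · intro x
        rw [ih2]
        constructor
        · rintro (h | ⟨h1, h2, h3⟩)
          · exact Or.inl h
          · exact Or.inr ⟨List.mem_cons.2 (Or.inr h1), h2, h3⟩
        · rintro (h | ⟨h1, h2, h3⟩)
          · exact Or.inl h
          · rcases List.mem_cons.1 h1 with h | h
            · subst h; exact absurd h2 hg
            · exact Or.inr ⟨h, h2, h3⟩

lemma pv_round_spec_canon (deps : List (String × List String)) (N : List String)
    (radj : PySem.Dict String (List String))
    (hrad : ∀ f x, x ∈ radj.getD f [] ↔ (x ∈ N ∧ f ∈ pvGetDeps deps x))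
    (F : List String) :
    ∀ (U : PySem.Dict String (PySem.Set String)) (acc : List String),
      (∀ m d, d ∈ U.getD m PySem.Set.empty → (m ∈ N ∧ d ∈ pvGetDeps deps m)) →
      (∀ x ∈ acc, U.getD x PySem.Set.empty = []) → acc.Nodup →
      ((∀ m d, d ∈ (F.foldl (fun st f =>
          (PySem.Dict.getD radj f []).foldl (fun (st2 : PySem.Dict String (PySem.Set String) × List String) m =>
            if f ∈ PySem.Dict.getD st2.1 m PySem.Set.empty then
              (st2.1.insert m (PySem.Set.discard (PySem.Dict.getD st2.1 m PySem.Set.empty) f),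
               if PySem.Set.discard (PySem.Dict.getD st2.1 m PySem.Set.empty) f = [] then st2.2 ++ [m] else st2.2)
            else st2) st) (U, acc)).1.getD m PySem.Set.empty ↔
            (d ∈ U.getD m PySem.Set.empty ∧ d ∉ F)) ∧
       (∀ x, x ∈ (F.foldl (fun st f =>
          (PySem.Dict.getD radj f []).foldl (fun (st2 : PySem.Dict String (PySem.Set String) × List String) m =>
            if f ∈ PySem.Dict.getD st2.1 m PySem.Set.empty then
              (st2.1.insert m (PySem.Set.discard (PySem.Dict.getD st2.1 m PySem.Set.empty) f),
               if PySem.Set.discard (PySem.Dict.getD st2.1 m PySem.Set.empty) f = [] then st2.2 ++ [m] else st2.2)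
            else st2) st) (U, acc)).2 ↔
            (x ∈ acc ∨ ((∃ d, d ∈ U.getD x PySem.Set.empty) ∧
              ∀ d ∈ U.getD x PySem.Set.empty, d ∈ F))) ∧
       (F.foldl (fun st f =>
          (PySem.Dict.getD radj f []).foldl (fun (st2 : PySem.Dict String (PySem.Set String) × List String) m =>
            if f ∈ PySem.Dict.getD st2.1 m PySem.Set.empty then
              (st2.1.insert m (PySem.Set.discard (PySem.Dict.getD st2.1 m PySem.Set.empty) f),
               if PySem.Set.discard (PySem.Dict.getD st2.1 m PySem.Set.empty) f = [] then st2.2 ++ [m] else st2.2)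
            else st2) st) (U, acc)).2.Nodup) := by
  induction F with
  | nil =>
    intro U acc hsub hacc hnd
    refine ⟨by simp, ?_, hnd⟩
    intro x
    simp only [List.foldl_nil, List.not_mem_nil]
    constructor
    · intro h; exact Or.inl h
    · rintro (h | ⟨⟨d, hd⟩, hall⟩)
      · exact h
      · exact absurd (hall d hd) (by simp)
  | cons f F' ih =>
    intro U acc hsub hacc hnd
    simp only [List.foldl_cons]
    obtain ⟨in1, in2, in3, in4⟩ := pv_round_inner_canon f (PySem.Dict.getD radj f []) U acc hacc hnd
    set st1 := ((PySem.Dict.getD radj f []).foldl (fun (st2 : PySem.Dict String (PySem.Set String) × List String) m =>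
            if f ∈ PySem.Dict.getD st2.1 m PySem.Set.empty then
              (st2.1.insert m (PySem.Set.discard (PySem.Dict.getD st2.1 m PySem.Set.empty) f),
               if PySem.Set.discard (PySem.Dict.getD st2.1 m PySem.Set.empty) f = [] then st2.2 ++ [m] else st2.2)
            else st2) (U, acc)) with hst1
    -- membership in U1 simplifies: the radj-guard is redundant
    have hU1 : ∀ m d, d ∈ st1.1.getD m PySem.Set.empty ↔ (d ∈ U.getD m PySem.Set.empty ∧ d ≠ f) := by
      intro m d
      rw [in1 m d]
      constructor
      · rintro ⟨h1, h2⟩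
        refine ⟨h1, ?_⟩
        have hmem : m ∈ radj.getD f [] ∨ d ≠ f := by
          by_cases hdf : d = f
          · subst hdf
            exact Or.inl ((hrad d m).2 ⟨(hsub m d h1).1, (hsub m d h1).2⟩)
          · exact Or.inr hdf
        rcases hmem with h | h
        · exact h2 h
        · exact h
      · rintro ⟨h1, h2⟩; exact ⟨h1, fun _ => h2⟩
    have hacc1 : ∀ x, x ∈ st1.2 ↔ (x ∈ acc ∨ (f ∈ U.getD x PySem.Set.empty ∧
        ∀ d ∈ U.getD x PySem.Set.empty, d = f)) := by
      intro x
      rw [in2 x]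
      constructor
      · rintro (h | ⟨_, h2, h3⟩)
        · exact Or.inl h
        · exact Or.inr ⟨h2, h3⟩
      · rintro (h | ⟨h2, h3⟩)
        · exact Or.inl h
        · exact Or.inr ⟨(hrad f x).2 ⟨(hsub x f h2).1, (hsub x f h2).2⟩, h2, h3⟩
    have hsub1 : ∀ m d, d ∈ st1.1.getD m PySem.Set.empty → (m ∈ N ∧ d ∈ pvGetDeps deps m) := by
      intro m d hd; exact hsub m d ((hU1 m d).1 hd).1
    obtain ⟨o1, o2, o3⟩ := ih st1.1 st1.2 hsub1 in3 in4
    have hpair : (st1.1, st1.2) = st1 := rfl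
    rw [hpair] at o1 o2 o3
    refine ⟨?_, ?_, o3⟩
    · intro m d
      rw [o1 m d, hU1 m d]
      simp only [List.mem_cons]
      tauto
    · intro x
      rw [o2 x, hacc1 x]
      constructor
      · rintro ((h | ⟨h1, h2⟩) | ⟨⟨d, hd⟩, hall⟩)
        · exact Or.inl h
        · exact Or.inr ⟨⟨f, h1⟩, fun d hd => List.mem_cons.2 (Or.inl (h2 d hd))⟩
        · rcases (hU1 x d).1 hd with ⟨hdU, hdf⟩
          refine Or.inr ⟨⟨d, hdU⟩, fun e he => ?_⟩
          by_cases hef : e = f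
          · exact List.mem_cons.2 (Or.inl hef)
          · exact List.mem_cons.2 (Or.inr (hall e ((hU1 x e).2 ⟨he, hef⟩)))
      · rintro (h | ⟨⟨d, hd⟩, hall⟩)
        · exact Or.inl (Or.inl h)
        · by_cases hempty : ∀ e ∈ U.getD x PySem.Set.empty, e = f
          · exact Or.inl (Or.inr ⟨hempty d hd ▸ hd, hempty⟩)
          · obtain ⟨e, heU, hef⟩ := not_forall₂.1 hempty
            refine Or.inr ⟨⟨e, (hU1 x e).2 ⟨heU, hef⟩⟩, fun e' he' => ?_⟩
            rcases (hU1 x e').1 he' with ⟨h1, h2⟩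
            rcases List.mem_cons.1 (hall e' h1) with h | h
            · exact absurd h h2
            · exact h

lemma pvBRound_eq_canon (radj : PySem.Dict String (List String)) (F : List String)
    (U : PySem.Dict String (PySem.Set String)) :
    pvBRound radj F U = F.foldl (fun st f =>
          (PySem.Dict.getD radj f []).foldl (fun (st2 : PySem.Dict String (PySem.Set String) × List String) m =>
            if f ∈ PySem.Dict.getD st2.1 m PySem.Set.empty then
              (st2.1.insert m (PySem.Set.discard (PySem.Dict.getD st2.1 m PySem.Set.empty) f),
               if PySem.Set.discard (PySem.Dict.getD st2.1 m PySem.Set.empty) f = [] then st2.2 ++ [m] else st2.2)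
            else st2) st) (U, []) := by
  unfold pvBRound
  simp only [pv_stepfun_eq]

lemma pv_main_loop (deps : List (String × List String)) (N : List String)
    (radj : PySem.Dict String (List String))
    (hrad : ∀ f x, x ∈ radj.getD f [] ↔ (x ∈ N ∧ f ∈ pvGetDeps deps x)) :
    ∀ (fuel : Nat) (remain built : PySem.Set String)
      (U : PySem.Dict String (PySem.Set String)) (F : List String)
      (levels : List (List String)) (done : Int),
      remain.Nodup → F.Nodup →
      (∀ x, x ∈ remain ↔ (x ∈ N ∧ x ∉ built)) →
      (∀ m d, d ∈ U.getD m PySem.Set.empty ↔ (m ∈ N ∧ d ∈ pvGetDeps deps m ∧ d ∉ built)) →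
      (∀ x, x ∈ F ↔ (x ∈ N ∧ x ∉ built ∧ ∀ d ∈ pvGetDeps deps x, d ∈ built)) →
      (∀ m ∈ built, ∀ d ∈ pvGetDeps deps m, d ∈ built) →
      pvALoop deps fuel remain built levels = (pvBLoop radj fuel F U levels done).1 := by
  intro fuel
  induction fuel with
  | zero => intro remain built U F levels done _ _ _ _ _ _; rfl
  | succ fuel ih =>
    intro remain built U F levels done hrnd hFnd hrm hU hF hC
    have hthis_mem : ∀ x, x ∈ pvAThis deps remain built ↔
        (x ∈ remain ∧ ∀ d ∈ pvGetDeps deps x, d ∈ built) := by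
      intro x
      rw [pvAThis_eq_filter]
      simp [List.mem_filter, PySem.Set.issubset_iff, PySem.Set.mem_ofList]
    have hthisF : ∀ x, x ∈ pvAThis deps remain built ↔ x ∈ F := by
      intro x
      rw [hthis_mem, hF, hrm]
      tauto
    by_cases hre : remain = []
    · have hFnil : F = [] := by
        rw [List.eq_nil_iff_forall_not_mem]
        intro x hx
        have h1 := (hF x).1 hx
        have h2 : x ∈ remain := (hrm x).2 ⟨h1.1, h1.2.1⟩
        rw [hre] at h2; simp at h2
      subst hFnil
      simp [pvALoop, pvBLoop, hre]
    · by_cases ht : pvAThis deps remain built = []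
      · have hFnil : F = [] := by
          rw [List.eq_nil_iff_forall_not_mem]
          intro x hx
          have h1 := (hthisF x).2 hx
          rw [ht] at h1; simp at h1
        subst hFnil
        simp [pvALoop, pvBLoop, hre, ht]
      · have hFne : F ≠ [] := by
          intro h
          apply ht
          rw [List.eq_nil_iff_forall_not_mem] at h ⊢
          intro x hx
          exact h x ((hthisF x).1 hx)
        simp only [pvALoop, pvBLoop]
        rw [if_neg hre, if_neg hFne, if_neg ht]
        have hsub : ∀ m d, d ∈ U.getD m PySem.Set.empty → (m ∈ N ∧ d ∈ pvGetDeps deps m) := by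
          intro m d hd; have h1 := (hU m d).1 hd; exact ⟨h1.1, h1.2.1⟩
        obtain ⟨r1, r2, r3⟩ := pv_round_spec_canon deps N radj hrad F U [] hsub (by simp) (by simp)
        rw [← pvBRound_eq_canon] at r1 r2 r3
        set this' := pvAThis deps remain built with hthis'
        set st := pvBRound radj F U with hst
        set built' := this'.foldl (fun b n => PySem.Set.add b n) built with hbuilt'
        have hmb' : ∀ x, x ∈ built' ↔ (x ∈ built ∨ x ∈ F) := by
          intro x
          rw [hbuilt', pv_mem_foldl_add]
          have h1 := hthisF x
          tauto
        have hsorted : PySem.List.sorted this' (fun x => x) = PySem.List.sorted F (fun x => x) := by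
          apply PySem.List.sorted_eq_sorted_of_perm
          · intro a b hab; exact hab
          · refine (List.perm_ext_iff_of_nodup ?_ hFnd).2 hthisF
            rw [hthis', pvAThis_eq_filter]
            exact hrnd.filter _
        rw [hsorted]
        apply ih
        · exact pv_nodup_foldl_discard _ _ hrnd
        · exact r3
        · intro x
          rw [pv_mem_foldl_discard, hrm, hmb' x]
          have h1 := hthisF x
          tauto
        · intro m d
          rw [r1 m d, hU m d, hmb' d]
          tauto
        · intro x
          rw [r2 x]
          simp only [List.not_mem_nil, false_or]
          constructor
          · rintro ⟨⟨d0, hd0⟩, hall⟩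
            obtain ⟨hxN, hd0D, hd0b⟩ := (hU x d0).1 hd0
            have hxb : x ∉ built := fun hxb => hd0b (hC x hxb d0 hd0D)
            have hxF : x ∉ F := fun hxF => hd0b ((hF x).1 hxF |>.2.2 d0 hd0D)
            refine ⟨hxN, ?_, ?_⟩
            · intro hmem
              rcases (hmb' x).1 hmem with h | h
              · exact hxb h
              · exact hxF h
            · intro d hd
              rw [hmb' d]
              by_cases hdb : d ∈ built
              · exact Or.inl hdb
              · exact Or.inr (hall d ((hU x d).2 ⟨hxN, hd, hdb⟩))
          · rintro ⟨hxN, hxb', hald⟩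
            have hxb : x ∉ built := fun h => hxb' ((hmb' x).2 (Or.inl h))
            have hxF : x ∉ F := fun h => hxb' ((hmb' x).2 (Or.inr h))
            constructor
            · by_contra hno
              have hallb : ∀ d ∈ pvGetDeps deps x, d ∈ built := by
                intro d hd
                by_contra hdb
                exact hno ⟨d, (hU x d).2 ⟨hxN, hd, hdb⟩⟩
              exact hxF ((hF x).2 ⟨hxN, hxb, hallb⟩)
            · intro d hd
              obtain ⟨_, hdD, hdb⟩ := (hU x d).1 hd
              rcases (hmb' d).1 (hald d hdD) with h | h
              · exact absurd h hdb
              · exact h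
        · intro m hm d hd
          rcases (hmb' m).1 hm with h | h
          · exact (hmb' d).2 (Or.inl (hC m h d hd))
          · exact (hmb' d).2 (Or.inl ((hF m).1 h |>.2.2 d hd))

lemma pv_radj_inner_mem (ds : List String) (n : String) (f x : String) :
    ∀ (r : PySem.Dict String (List String)),
    x ∈ (ds.foldl (fun r d => r.insert d (PySem.Dict.getD r d [] ++ [n])) r).getD f []
      ↔ (x ∈ r.getD f [] ∨ (f ∈ ds ∧ x = n)) := by
  induction ds with
  | nil => simp
  | cons d t ih =>
    intro r
    simp only [List.foldl_cons]
    rw [ih]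
    by_cases hfd : f = d
    · subst hfd; rw [PySem.Dict.getD_insert]; simp; tauto
    · rw [PySem.Dict.getD_insert_of_ne _ _ _ hfd]; simp only [List.mem_cons]; tauto

lemma pv_bInit_unmet (deps : List (String × List String)) (ns : List String) (m : String) :
    ∀ (st : PySem.Dict String (PySem.Set String) × PySem.Dict String (List String)),
    ((ns.foldl (fun st n =>
        let ds := PySem.Set.ofList (pvGetDeps deps n)
        (st.1.insert n ds,
         ds.foldl (fun r d => r.insert d (PySem.Dict.getD r d [] ++ [n])) st.2)) st).1).getD m PySem.Set.empty
      = if m ∈ ns then PySem.Set.ofList (pvGetDeps deps m) else st.1.getD m PySem.Set.empty := by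
  induction ns with
  | nil => simp
  | cons n t ih =>
    intro st
    simp only [List.foldl_cons]
    rw [ih]
    by_cases hm : m ∈ t
    · simp [hm]
    · by_cases hmn : m = n
      · subst hmn
        rw [PySem.Dict.getD_insert]
        simp [hm]
      · rw [PySem.Dict.getD_insert_of_ne _ _ _ hmn]
        simp [hm, hmn]

lemma pv_bInit_radj (deps : List (String × List String)) (ns : List String) (f x : String) :
    ∀ (st : PySem.Dict String (PySem.Set String) × PySem.Dict String (List String)),
    (x ∈ ((ns.foldl (fun st n =>
        let ds := PySem.Set.ofList (pvGetDeps deps n)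
        (st.1.insert n ds,
         ds.foldl (fun r d => r.insert d (PySem.Dict.getD r d [] ++ [n])) st.2)) st).2).getD f []
      ↔ (x ∈ st.2.getD f [] ∨ (x ∈ ns ∧ f ∈ pvGetDeps deps x))) := by
  induction ns with
  | nil => simp
  | cons n t ih =>
    intro st
    simp only [List.foldl_cons]
    rw [ih]
    rw [pv_radj_inner_mem]
    simp only [PySem.Set.mem_ofList, List.mem_cons]
    constructor
    · rintro ((h | ⟨h1, rfl⟩) | ⟨h1, h2⟩) <;> tauto
    · rintro (h | ⟨(rfl | h1), h2⟩) <;> tauto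


theorem pv_ports_eq (order : List String) (deps : List (String × List String)) :
    levels_from_order_py order deps = levels_from_order_py_alt order deps := by
  simp only [levels_from_order_py, levels_from_order_py_alt]
  set N := PySem.Set.ofList order with hN
  set st := pvBInit deps N with hst
  have hst' : st = N.foldl (fun st n =>
      let ds := PySem.Set.ofList (pvGetDeps deps n)
      (st.1.insert n ds,
       ds.foldl (fun r d => r.insert d (PySem.Dict.getD r d [] ++ [n])) st.2))
      (PySem.Dict.mk [], PySem.Dict.mk []) := by rw [hst]; rfl
  have hU0 : ∀ m, st.1.getD m PySem.Set.empty
      = if m ∈ N then PySem.Set.ofList (pvGetDeps deps m) else PySem.Set.empty := by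
    intro m
    rw [hst']
    exact pv_bInit_unmet deps N m (PySem.Dict.mk [], PySem.Dict.mk [])
  have hrad : ∀ f x, x ∈ st.2.getD f [] ↔ (x ∈ N ∧ f ∈ pvGetDeps deps x) := by
    intro f x
    rw [hst']
    rw [pv_bInit_radj deps N f x (PySem.Dict.mk [], PySem.Dict.mk [])]
    rw [show (PySem.Dict.mk ([] : List (String × List String))).getD f [] = [] from rfl]
    simp
  apply pv_main_loop deps N st.2 hrad N.length N PySem.Set.empty st.1
      (N.filter (fun n => (PySem.Dict.getD st.1 n PySem.Set.empty).isEmpty)) [] 0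
      (PySem.Set.nodup_ofList order)
      ((PySem.Set.nodup_ofList order).filter _)
  · intro x
    simp [PySem.Set.empty]
  · intro m d
    rw [hU0 m]
    by_cases hm : m ∈ N
    · rw [if_pos hm]
      simp [PySem.Set.mem_ofList, hm, PySem.Set.empty]
    · rw [if_neg hm]
      simp [PySem.Set.empty, hm]
  · intro x
    rw [List.mem_filter]
    simp only [List.isEmpty_iff]
    rw [hU0 x]
    by_cases hx : x ∈ N
    · rw [if_pos hx]
      simp only [hx, true_and]
      constructor
      · intro h
        refine ⟨by simp [PySem.Set.empty], ?_⟩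
        intro d hd
        exact absurd ((PySem.Set.mem_ofList _ _).2 hd) (h ▸ List.not_mem_nil)
      · rintro ⟨-, hall⟩
        rw [List.eq_nil_iff_forall_not_mem]
        intro d hd
        exact absurd (hall d ((PySem.Set.mem_ofList _ _).1 hd)) (by simp [PySem.Set.empty])
    · simp [hx]
  · intro m hm
    simp [PySem.Set.empty] at hm

-- ===== VERDICT (by name: the statement is the Claim_ definition above) =====
theorem levels_from_order_py_spec : Claim_equal_levels_from_order_py := by
  intro order deps _ _
  unfold Spec_levels_from_order_py
  exact pv_ports_eq order deps
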